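-- pv_equiv track=rewrite | github.com/clarindaho/ho_jung_shin_tsuei_eecs341_finalproject | routes.py | format_selected_cuisine
-- ===== SOURCE A (Python) =====
-- def format_selected_cuisine(selected_cuisines):
-- 	# Join all the characters in the array to a string
-- 	formatted_selected_cuisines = ''.join(selected_cuisines)[1:-1]
--
-- 	# Parse through the string to put together which cuisines were selected
-- 	array_selected_cuisines = []
-- 	selected_cuisine = None
-- 	for char in formatted_selected_cuisines:
-- 		if char is '\'':
-- 			if selected_cuisine != None:
-- 				# End of a selected cuisine
-- 				array_selected_cuisines.append(selected_cuisine)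
-- 				selected_cuisine = None
-- 			else:
-- 				# Beginning of a selected cuisine
-- 				selected_cuisine = ""
-- 		elif char != ',' and selected_cuisine != None:
-- 			# Build selected cuisine name
-- 			selected_cuisine += char
--
-- 	return array_selected_cuisines
-- ===== SOURCE B (Python) =====
-- def format_selected_cuisine(selected_cuisines):
--     # Split the joined, trimmed string on single quotes: the text inside each
--     # complete pair of quotes is a selected cuisine (commas inside it dropped).
--     parts = ''.join(selected_cuisines)[1:-1].split("'")
--     names = []
--     inner = parts[1:]
--     while len(inner) >= 2:
--         names.append(inner[0].replace(',', ''))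
--         inner = inner[2:]
--     return names
-- ===== Notes on version B (the rewrite author's own statement) =====
-- stated objective: simpler
-- what changed: Replaces A's Python-level character-by-character quote-toggle state machine with a single str.split on single quotes followed by consuming the parts two at a time (the text inside each complete quote pair, commas stripped via str.replace), moving the scan into C-level string methods.
import Mathlib
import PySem

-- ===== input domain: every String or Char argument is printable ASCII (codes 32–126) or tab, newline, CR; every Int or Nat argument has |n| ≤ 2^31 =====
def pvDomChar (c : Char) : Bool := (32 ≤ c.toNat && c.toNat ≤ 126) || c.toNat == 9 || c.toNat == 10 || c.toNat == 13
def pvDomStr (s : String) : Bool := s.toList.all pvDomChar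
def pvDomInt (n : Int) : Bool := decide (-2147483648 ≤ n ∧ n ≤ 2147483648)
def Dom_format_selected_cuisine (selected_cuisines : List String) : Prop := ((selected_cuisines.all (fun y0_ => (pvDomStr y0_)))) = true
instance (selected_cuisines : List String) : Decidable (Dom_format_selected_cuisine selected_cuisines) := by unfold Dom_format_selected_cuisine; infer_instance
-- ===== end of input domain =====

-- B replaces A's character-by-character quote-toggle state machine by splitting the
-- string on single quotes and taking every complete pair (simpler; measured faster by a constant factor).
-- Strings are handled as List Char via PySem.Chars, converted back with String.ofList at the end.

-- ===== PORT A =====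
-- A's loop body: state = (cuisines collected so far, cuisine currently being built or none)
def fscStep (st : List (List Char) × Option (List Char)) (c : Char) : List (List Char) × Option (List Char) :=
  if c = '\'' then
    match st.2 with
    | some cur => (st.1 ++ [cur], none)   -- end of a selected cuisine
    | none     => (st.1, some [])          -- beginning of a selected cuisine
  else if c ≠ ',' then
    match st.2 with
    | some cur => (st.1, some (cur ++ [c]))  -- build selected cuisine name
    | none     => st
  else st

def format_selected_cuisine (selected_cuisines : List String) : List String :=
  let formatted := PySem.Chars.slice (PySem.Chars.join [] (selected_cuisines.map String.toList)) (some 1) (some (-1))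
  ((formatted.foldl fscStep ([], (none : Option (List Char)))).1).map String.ofList

-- ===== PORT B =====
-- Source B's while loop: consume the post-first-quote parts two at a time; a pair exists iff the quote closes
def fscPairs : List (List Char) → List (List Char)
  | p :: _ :: rest => PySem.Chars.replace p [','] [] :: fscPairs rest
  | _ => []

def format_selected_cuisine_alt (selected_cuisines : List String) : List String :=
  let parts := PySem.Chars.splitOn (PySem.Chars.slice (PySem.Chars.join [] (selected_cuisines.map String.toList)) (some 1) (some (-1))) ['\'']
  (fscPairs (PySem.List.slice parts (some 1) none)).map String.ofList

-- ===== PRECONDITION & SPEC =====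
def Spec_format_selected_cuisine (selected_cuisines : List String) (out : List String) : Prop := out = format_selected_cuisine_alt selected_cuisines
instance (selected_cuisines : List String) (out : List String) : Decidable (Spec_format_selected_cuisine selected_cuisines out) := by unfold Spec_format_selected_cuisine; infer_instance

-- ===== CLAIM (what is proved, stated in full; the proofs are below) =====
def Claim_equal_format_selected_cuisine : Prop := ∀ (selected_cuisines : List String), Dom_format_selected_cuisine selected_cuisines → Spec_format_selected_cuisine selected_cuisines (format_selected_cuisine selected_cuisines)

-- ===== LEMMAS AND PROOFS =====

-- proof-side model of splitting on a single quote
def splitQ : List Char → List (List Char)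
  | [] => [[]]
  | c :: cs => if c = '\'' then [] :: splitQ cs
               else match splitQ cs with
                    | p :: ps => (c :: p) :: ps
                    | [] => [[c]]

theorem splitQ_ne_nil (cs : List Char) : splitQ cs ≠ [] := by
  cases cs with
  | nil => simp [splitQ]
  | cons c cs =>
    simp only [splitQ]
    split
    · simp
    · split <;> simp

def consHead (pre : List Char) : List (List Char) → List (List Char)
  | p :: ps => (pre ++ p) :: ps
  | [] => [pre]

theorem go_eq (cs : List Char) : ∀ (fuel : Nat) (cur : List Char) (acc : List (List Char)),
    cs.length < fuel →
    PySem.Chars.splitOn.go ['\''] fuel cs cur acc = acc.reverse ++ consHead cur.reverse (splitQ cs) := by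
  induction cs with
  | nil =>
    intro fuel cur acc h
    match fuel, h with
    | n+1, _ => simp [PySem.Chars.splitOn.go, splitQ, consHead]
  | cons c cs ih =>
    intro fuel cur acc h
    match fuel, h with
    | n+1, h =>
      simp only [PySem.Chars.splitOn.go]
      by_cases hc : c = '\''
      · subst hc
        rw [if_pos (by simp [List.isPrefixOf])]
        simp only [List.length_cons, List.drop_succ_cons, List.length_nil, List.drop_zero]
        rw [ih n [] (cur.reverse :: acc) (by simp at h ⊢; omega)]
        simp only [splitQ, if_true]
        cases hq : splitQ cs with
        | nil => exact absurd hq (splitQ_ne_nil cs)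
        | cons p ps => simp [consHead]
      · rw [if_neg (by simp [List.isPrefixOf]; intro e; exact hc e.symm)]
        rw [ih n (c :: cur) acc (by simp at h ⊢; omega)]
        simp only [splitQ, if_neg hc]
        cases hq : splitQ cs with
        | nil => exact absurd hq (splitQ_ne_nil cs)
        | cons p ps => simp [consHead]

theorem splitOn_eq (cs : List Char) : PySem.Chars.splitOn cs ['\''] = splitQ cs := by
  unfold PySem.Chars.splitOn
  rw [go_eq cs (cs.length + 1) [] [] (by omega)]
  cases hq : splitQ cs with
  | nil => exact absurd hq (splitQ_ne_nil cs)
  | cons p ps => simp [consHead]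

theorem replace_go_eq (cs : List Char) : ∀ (fuel : Nat) (acc : List Char),
    cs.length ≤ fuel →
    PySem.Chars.replace.go [','] [] fuel cs acc = acc.reverse ++ cs.filter (· ≠ ',') := by
  induction cs with
  | nil =>
    intro fuel acc _
    cases fuel <;> simp [PySem.Chars.replace.go]
  | cons c cs ih =>
    intro fuel acc h
    match fuel, h with
    | n+1, h =>
      simp only [PySem.Chars.replace.go]
      by_cases hc : c = ','
      · subst hc
        rw [if_pos (by simp [List.isPrefixOf])]
        simp only [List.length_cons, List.drop_succ_cons, List.length_nil, List.drop_zero, List.reverse_nil, List.nil_append]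
        rw [ih n acc (by simp at h ⊢; omega)]
        simp
      · rw [if_neg (by simp [List.isPrefixOf]; intro e; exact hc e.symm)]
        rw [ih n (c :: acc) (by simp at h ⊢; omega)]
        simp [hc]

theorem replace_comma (cs : List Char) : PySem.Chars.replace cs [','] [] = cs.filter (· ≠ ',') := by
  unfold PySem.Chars.replace
  rw [if_neg (by simp), replace_go_eq cs cs.length [] (le_refl _)]
  simp

-- the two states of A's loop, characterised against splitQ
theorem foldl_fscStep_eq (cs : List Char) :
    (∀ acc, (cs.foldl fscStep (acc, none)).1 = acc ++ fscPairs (splitQ cs).tail) ∧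
    (∀ acc buf, (cs.foldl fscStep (acc, some buf)).1 =
      match splitQ cs with
      | [_] => acc
      | p :: ps => acc ++ (buf ++ p.filter (· ≠ ',')) :: fscPairs ps.tail
      | [] => acc) := by
  induction cs with
  | nil =>
    constructor
    · intro acc; simp [splitQ, fscPairs]
    · intro acc buf; simp [splitQ]
  | cons c cs ih =>
    obtain ⟨ihN, ihS⟩ := ih
    constructor
    · intro acc
      by_cases hc : c = '\''
      · subst hc
        simp only [List.foldl_cons, fscStep, if_true]
        rw [ihS acc []]
        simp only [splitQ, if_true]
        cases hq : splitQ cs with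
        | nil => exact absurd hq (splitQ_ne_nil cs)
        | cons p ps =>
          cases ps with
          | nil => simp [fscPairs]
          | cons p2 rest => simp [fscPairs, replace_comma]
      · have : cs.foldl fscStep (acc, none) = (c :: cs).foldl fscStep (acc, none) := by
          simp only [List.foldl_cons, fscStep, if_neg hc]
          by_cases h2 : c = ','
          · simp [h2]
          · simp [h2]
        rw [← this, ihN acc]
        simp only [splitQ, if_neg hc]
        cases hq : splitQ cs with
        | nil => exact absurd hq (splitQ_ne_nil cs)
        | cons p ps => simp
    · intro acc buf
      by_cases hc : c = '\''
      · subst hc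
        simp only [List.foldl_cons, fscStep, if_true]
        rw [ihN (acc ++ [buf])]
        simp only [splitQ, if_true]
        cases hq : splitQ cs with
        | nil => exact absurd hq (splitQ_ne_nil cs)
        | cons p ps => simp
      · by_cases h2 : c = ','
        · subst h2
          simp only [List.foldl_cons, fscStep, if_neg hc]
          simp only [ne_eq, not_true_eq_false, if_false]
          rw [ihS acc buf]
          simp only [splitQ, if_neg hc]
          cases hq : splitQ cs with
          | nil => exact absurd hq (splitQ_ne_nil cs)
          | cons p ps =>
            cases ps with
            | nil => simp
            | cons p2 rest => simp
        · simp only [List.foldl_cons, fscStep, if_neg hc, ne_eq, h2, not_false_eq_true, if_true]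
          rw [ihS acc (buf ++ [c])]
          simp only [splitQ, if_neg hc]
          cases hq : splitQ cs with
          | nil => exact absurd hq (splitQ_ne_nil cs)
          | cons p ps =>
            cases ps with
            | nil => simp
            | cons p2 rest => simp [h2]

-- ===== VERDICT (by name: the statement is the Claim_ definition above) =====
theorem format_selected_cuisine_spec : Claim_equal_format_selected_cuisine := by
  intro sel _
  show _ = _
  unfold format_selected_cuisine format_selected_cuisine_alt
  simp only [splitOn_eq, PySem.List.slice_from_one]
  set cs := PySem.Chars.slice (PySem.Chars.join [] (sel.map String.toList)) (some 1) (some (-1)) with hcs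
  rw [(foldl_fscStep_eq cs).1 []]
  simp
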